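-- pv_equiv track=rewrite | github.com/actonbp/sud_council_paper | archive/experimental_python/spacy_enhanced_topic_model.py | interpret_linguistic_patterns
-- ===== SOURCE A (Python) =====
-- def interpret_linguistic_patterns(noun_phrases, action_verbs, adjectives, tokens):
--     """Interpret topic based on linguistic patterns"""
--
--     # Combine all terms for analysis
--     all_content = ' '.join(noun_phrases + action_verbs + adjectives + tokens).lower()
--
--     # Pattern-based interpretation
--     if any(term in all_content for term in ['family', 'personal', 'experience', 'background', 'parent']):
--         if any(term in all_content for term in ['help', 'support', 'care']):
--             return "Personal & Family Experience Driving Service"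
--         else:
--             return "Personal & Family Background Influence"
--
--     elif any(term in all_content for term in ['help', 'support', 'people', 'care', 'assist']):
--         if any(term in all_content for term in ['responsibility', 'important', 'meaningful']):
--             return "Service-Oriented Helping with Responsibility"
--         else:
--             return "People-Focused Helping & Support"
--
--     elif any(term in all_content for term in ['career', 'path', 'field', 'professional', 'work', 'job']):
--         if any(term in all_content for term in ['interest', 'consider', 'think', 'future']):
--             return "Career Exploration & Professional Interest"
--         else:
--             return "Professional Career Development"
--
--     elif any(term in all_content for term in ['school', 'education', 'learn', 'study', 'knowledge']):
--         return "Educational Pathway & Academic Preparation"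
--
--     else:
--         return "Mixed Motivational Factors"
-- ===== SOURCE B (Python) =====
-- _TERMS = ('family', 'personal', 'experience', 'background', 'parent',
--           'help', 'support', 'care', 'people', 'assist',
--           'responsibility', 'important', 'meaningful',
--           'career', 'path', 'field', 'professional', 'work', 'job',
--           'interest', 'consider', 'think', 'future',
--           'school', 'education', 'learn', 'study', 'knowledge')
--
--
-- def interpret_linguistic_patterns(noun_phrases, action_verbs, adjectives, tokens):
--     """One left-to-right positional scan of the combined content collects the set
--     of cue terms occurring in it (terms are bucketed by first character, so each
--     position only tries the terms that could start there); a pure membership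
--     decision on that set then picks the label.  Correct because every cue term is
--     non-empty, so t in content iff t starts at some position i < len(content)."""
--     content = ' '.join(noun_phrases + action_verbs + adjectives + tokens).lower()
--     buckets = {}
--     for t in _TERMS:
--         buckets.setdefault(t[0], []).append(t)
--     found = set()
--     for i, c in enumerate(content):
--         for t in buckets.get(c, []):
--             if content.startswith(t, i):
--                 found.add(t)
--
--     def has(*ts):
--         return any(t in found for t in ts)
--
--     if has('family', 'personal', 'experience', 'background', 'parent'):
--         if has('help', 'support', 'care'):
--             return "Personal & Family Experience Driving Service"
--         return "Personal & Family Background Influence"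
--     if has('help', 'support', 'people', 'care', 'assist'):
--         if has('responsibility', 'important', 'meaningful'):
--             return "Service-Oriented Helping with Responsibility"
--         return "People-Focused Helping & Support"
--     if has('career', 'path', 'field', 'professional', 'work', 'job'):
--         if has('interest', 'consider', 'think', 'future'):
--             return "Career Exploration & Professional Interest"
--         return "Professional Career Development"
--     if has('school', 'education', 'learn', 'study', 'knowledge'):
--         return "Educational Pathway & Academic Preparation"
--     return "Mixed Motivational Factors"
-- ===== Notes on version B (the rewrite author's own statement) =====
-- stated objective: alternative
-- what changed: Instead of A's per-term substring searches inside the if/elif chain, B makes a single positional scan of the combined content with terms bucketed by first character, collecting the set of all cue terms that occur, and then decides the label by pure membership tests on that precomputed set.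
import Mathlib
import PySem

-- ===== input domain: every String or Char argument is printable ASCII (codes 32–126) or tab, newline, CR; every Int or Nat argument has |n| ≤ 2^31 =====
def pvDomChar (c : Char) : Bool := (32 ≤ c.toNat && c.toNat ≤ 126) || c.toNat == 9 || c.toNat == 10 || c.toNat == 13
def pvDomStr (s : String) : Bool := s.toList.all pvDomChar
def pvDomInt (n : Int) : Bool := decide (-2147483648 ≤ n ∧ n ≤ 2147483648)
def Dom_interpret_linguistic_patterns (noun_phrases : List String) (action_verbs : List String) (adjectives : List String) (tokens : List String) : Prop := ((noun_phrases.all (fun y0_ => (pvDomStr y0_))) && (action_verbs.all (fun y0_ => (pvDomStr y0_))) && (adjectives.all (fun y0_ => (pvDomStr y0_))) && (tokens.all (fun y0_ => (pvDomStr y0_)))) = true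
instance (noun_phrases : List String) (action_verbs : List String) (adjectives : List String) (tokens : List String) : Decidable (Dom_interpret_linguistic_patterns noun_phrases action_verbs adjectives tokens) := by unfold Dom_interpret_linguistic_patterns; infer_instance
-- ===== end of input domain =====

-- B replaces A's per-term substring searches by one positional scan that collects the set of cue
-- terms occurring in the content, followed by a pure membership decision (objective: alternative).

-- ===== PORT A =====
def interpret_linguistic_patterns (noun_phrases : List String) (action_verbs : List String) (adjectives : List String) (tokens : List String) : String :=
  let all_content := PySem.Str.lower (PySem.Str.join " " (noun_phrases ++ action_verbs ++ adjectives ++ tokens))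
  if ["family", "personal", "experience", "background", "parent"].any (fun term => PySem.Str.isIn term all_content) then
    if ["help", "support", "care"].any (fun term => PySem.Str.isIn term all_content) then
      "Personal & Family Experience Driving Service"
    else
      "Personal & Family Background Influence"
  else if ["help", "support", "people", "care", "assist"].any (fun term => PySem.Str.isIn term all_content) then
    if ["responsibility", "important", "meaningful"].any (fun term => PySem.Str.isIn term all_content) then
      "Service-Oriented Helping with Responsibility"
    else
      "People-Focused Helping & Support"
  else if ["career", "path", "field", "professional", "work", "job"].any (fun term => PySem.Str.isIn term all_content) then
    if ["interest", "consider", "think", "future"].any (fun term => PySem.Str.isIn term all_content) then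
      "Career Exploration & Professional Interest"
    else
      "Professional Career Development"
  else if ["school", "education", "learn", "study", "knowledge"].any (fun term => PySem.Str.isIn term all_content) then
    "Educational Pathway & Academic Preparation"
  else
    "Mixed Motivational Factors"

-- ===== PORT B =====
def pvTerms : List String :=
  ["family", "personal", "experience", "background", "parent",
   "help", "support", "care", "people", "assist",
   "responsibility", "important", "meaningful",
   "career", "path", "field", "professional", "work", "job",
   "interest", "consider", "think", "future",
   "school", "education", "learn", "study", "knowledge"]

-- t[0]: exact here because every term in the table is non-empty
def pvHead (t : String) : Char := t.toList.headD ' '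

-- buckets.setdefault(t[0], []).append(t) over the table (dict of first char -> terms)
def pvBuckets : PySem.Dict Char (List String) :=
  pvTerms.foldl (fun d t => d.modify (pvHead t) [] (· ++ [t])) PySem.Dict.empty

-- for i, c in enumerate(content): for t in buckets.get(c, []): if content.startswith(t, i): found.add(t)
-- content.startswith(t, i) with 0 ≤ i (from enumerate): exact as Chars.startswith on the i-dropped char list
def pvCollect (cs : List Char) : PySem.Set String :=
  (PySem.List.enumerate cs).foldl
    (fun acc p =>
      (pvBuckets.getD p.2 []).foldl
        (fun a t => if PySem.Chars.startswith (cs.drop p.1.toNat) t.toList then PySem.Set.add a t else a)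
        acc)
    PySem.Set.empty

def pvHas (found : PySem.Set String) (ts : List String) : Bool :=
  ts.any (fun t => PySem.Set.contains found t)

def interpret_linguistic_patterns_alt (noun_phrases : List String) (action_verbs : List String) (adjectives : List String) (tokens : List String) : String :=
  let content := PySem.Str.lower (PySem.Str.join " " (noun_phrases ++ action_verbs ++ adjectives ++ tokens))
  let found := pvCollect content.toList
  if pvHas found ["family", "personal", "experience", "background", "parent"] then
    if pvHas found ["help", "support", "care"] then
      "Personal & Family Experience Driving Service"
    else
      "Personal & Family Background Influence"
  else if pvHas found ["help", "support", "people", "care", "assist"] then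
    if pvHas found ["responsibility", "important", "meaningful"] then
      "Service-Oriented Helping with Responsibility"
    else
      "People-Focused Helping & Support"
  else if pvHas found ["career", "path", "field", "professional", "work", "job"] then
    if pvHas found ["interest", "consider", "think", "future"] then
      "Career Exploration & Professional Interest"
    else
      "Professional Career Development"
  else if pvHas found ["school", "education", "learn", "study", "knowledge"] then
    "Educational Pathway & Academic Preparation"
  else
    "Mixed Motivational Factors"

-- ===== PRECONDITION & SPEC =====
def Spec_interpret_linguistic_patterns (noun_phrases : List String) (action_verbs : List String) (adjectives : List String) (tokens : List String) (out : String) : Prop := out = interpret_linguistic_patterns_alt noun_phrases action_verbs adjectives tokens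
instance (noun_phrases : List String) (action_verbs : List String) (adjectives : List String) (tokens : List String) (out : String) : Decidable (Spec_interpret_linguistic_patterns noun_phrases action_verbs adjectives tokens out) := by unfold Spec_interpret_linguistic_patterns; infer_instance

-- ===== CLAIM (what is proved, stated in full; the proofs are below) =====
def Claim_equal_interpret_linguistic_patterns : Prop := ∀ (noun_phrases : List String) (action_verbs : List String) (adjectives : List String) (tokens : List String), Dom_interpret_linguistic_patterns noun_phrases action_verbs adjectives tokens → Spec_interpret_linguistic_patterns noun_phrases action_verbs adjectives tokens (interpret_linguistic_patterns noun_phrases action_verbs adjectives tokens)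

-- ===== LEMMAS AND PROOFS =====

-- the inner loop over the term list: t ends up in the set iff it was there or matched at this position
theorem pv_mem_inner (terms : List String) (p : String → Bool) (acc : PySem.Set String) (t : String) :
    t ∈ terms.foldl (fun a u => if p u then PySem.Set.add a u else a) acc ↔
      t ∈ acc ∨ (t ∈ terms ∧ p t = true) := by
  induction terms generalizing acc with
  | nil => simp
  | cons u rest ih =>
    simp only [List.foldl_cons]
    by_cases hu : p u = true
    · rw [if_pos hu, ih]
      simp only [PySem.Set.mem_add, List.mem_cons]
      constructor
      · rintro ((h | rfl) | ⟨h, hp⟩)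
        · exact Or.inl h
        · exact Or.inr ⟨Or.inl rfl, hu⟩
        · exact Or.inr ⟨Or.inr h, hp⟩
      · rintro (h | ⟨rfl | h, hp⟩)
        · exact Or.inl (Or.inl h)
        · exact Or.inl (Or.inr rfl)
        · exact Or.inr ⟨h, hp⟩
    · rw [if_neg hu, ih]
      simp only [List.mem_cons]
      constructor
      · rintro (h | ⟨h, hp⟩)
        · exact Or.inl h
        · exact Or.inr ⟨Or.inr h, hp⟩
      · rintro (h | ⟨rfl | h, hp⟩)
        · exact Or.inl h
        · exact absurd hp hu
        · exact Or.inr ⟨h, hp⟩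

-- the outer loop over the enumerated positions
theorem pv_mem_outer (cs : List Char) (ps : List (Int × Char)) (acc : PySem.Set String) (t : String) :
    t ∈ ps.foldl
        (fun acc p =>
          (pvBuckets.getD p.2 []).foldl
            (fun a u => if PySem.Chars.startswith (cs.drop p.1.toNat) u.toList then PySem.Set.add a u else a)
            acc)
        acc ↔
      t ∈ acc ∨ ∃ p ∈ ps, t ∈ pvBuckets.getD p.2 [] ∧ PySem.Chars.startswith (cs.drop p.1.toNat) t.toList = true := by
  induction ps generalizing acc with
  | nil => simp
  | cons p rest ih =>
    simp only [List.foldl_cons, ih, pv_mem_inner]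
    constructor
    · rintro ((h | ⟨hb, hs⟩) | ⟨q, hq, hb, hs⟩)
      · exact Or.inl h
      · exact Or.inr ⟨p, List.mem_cons_self, hb, hs⟩
      · exact Or.inr ⟨q, List.mem_cons_of_mem _ hq, hb, hs⟩
    · rintro (h | ⟨q, hq, hb, hs⟩)
      · exact Or.inl (Or.inl h)
      · rcases List.mem_cons.mp hq with rfl | hq
        · exact Or.inl (Or.inr ⟨hb, hs⟩)
        · exact Or.inr ⟨q, hq, hb, hs⟩

-- the bucket of c holds exactly the table terms whose first character is c
theorem pv_bucket (c : Char) :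
    pvBuckets.getD c [] = pvTerms.filter (fun t => pvHead t == c) := by
  have h : pvBuckets
      = (pvTerms.map (fun t => (pvHead t, t))).foldl
          (fun d p => d.modify p.1 [] (· ++ [p.2])) PySem.Dict.empty := by
    rw [List.foldl_map]
    rfl
  rw [h, PySem.Dict.getD_foldl_modify_append]
  simp [List.filter_map, Function.comp_def, List.map_map]

-- a non-empty table term is collected iff it is a prefix of some suffix of the content
theorem pv_mem_collect (cs : List Char) (t : String) (hmem : t ∈ pvTerms) (hne : t.toList ≠ []) :
    t ∈ pvCollect cs ↔ ∃ i, t.toList <+: cs.drop i := by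
  unfold pvCollect
  rw [pv_mem_outer]
  simp only [PySem.Set.empty, List.not_mem_nil, false_or]
  constructor
  · rintro ⟨p, _, _, hs⟩
    exact ⟨p.1.toNat, (PySem.Chars.startswith_iff _ _).mp hs⟩
  · rintro ⟨j, hpre⟩
    have hj : j < cs.length := by
      by_contra hj
      have hdrop : cs.drop j = [] := List.drop_eq_nil_of_le (by omega)
      rw [hdrop] at hpre
      exact hne (List.prefix_nil.mp hpre)
    obtain ⟨h0, tl, hteq⟩ : ∃ h0 tl, t.toList = h0 :: tl := by
      cases ht : t.toList with
      | nil => exact absurd ht hne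
      | cons a b => exact ⟨a, b, rfl⟩
    have hdropj : cs.drop j = cs[j] :: cs.drop (j + 1) := List.drop_eq_getElem_cons hj
    have hhead : h0 = cs[j] := by
      rcases hpre with ⟨rest, hrest⟩
      rw [hteq, hdropj] at hrest
      exact (List.cons.injEq _ _ _ _ ▸ hrest :
        h0 = cs[j] ∧ tl ++ rest = cs.drop (j + 1)).1
    refine ⟨((j : Int), cs[j]), ?_, ?_, ?_⟩
    · exact (PySem.List.mem_enumerate_iff _ _ _).mpr ⟨j, hj, by simp⟩
    · rw [pv_bucket]
      refine List.mem_filter.mpr ⟨hmem, ?_⟩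
      simp [pvHead, hteq, hhead]
    · exact (PySem.Chars.startswith_iff _ _).mpr (by simpa using hpre)

-- membership in the collected set = Python's substring test, for any non-empty term of the table
theorem pv_contains_collect (s : String) (t : String) (hmem : t ∈ pvTerms) (hne : t.toList ≠ []) :
    PySem.Set.contains (pvCollect s.toList) t = PySem.Str.isIn t s := by
  have hstr : PySem.Str.isIn t s = PySem.Chars.isIn t.toList s.toList := by
    simp [PySem.Str.isIn_eq]
  rw [hstr, Bool.eq_iff_iff, PySem.Set.contains_iff, pv_mem_collect _ _ hmem hne]
  exact PySem.Chars.exists_prefix_drop_iff_isIn _ _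

-- lift pv_contains_collect through List.any over a sub-list of pvTerms
theorem pv_has_eq (s : String) (ts : List String)
    (h : ∀ t ∈ ts, t ∈ pvTerms ∧ t.toList ≠ []) :
    pvHas (pvCollect s.toList) ts = ts.any (fun t => PySem.Str.isIn t s) := by
  induction ts with
  | nil => rfl
  | cons u rest ih =>
    have hu := h u (List.mem_cons_self)
    simp only [pvHas, List.any_cons] at *
    rw [pv_contains_collect s u hu.1 hu.2, ih (fun t ht => h t (List.mem_cons_of_mem _ ht))]

-- ===== VERDICT (by name: the statement is the Claim_ definition above) =====
theorem interpret_linguistic_patterns_spec : Claim_equal_interpret_linguistic_patterns := by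
  intro np av adj tk _
  unfold Spec_interpret_linguistic_patterns interpret_linguistic_patterns interpret_linguistic_patterns_alt
  simp only []
  rw [pv_has_eq _ _ (by decide), pv_has_eq _ _ (by decide), pv_has_eq _ _ (by decide),
      pv_has_eq _ _ (by decide), pv_has_eq _ _ (by decide), pv_has_eq _ _ (by decide),
      pv_has_eq _ _ (by decide)]
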